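-- pv_equiv track=rewrite | github.com/AndryRafam/Algo-Dojo | AtCoder/cd_981A.py | longest_nonpal
-- ===== SOURCE A (Python) =====
-- def is_palindrome(s:str)->bool:
--     rev = str()
--     rev = reversed(s)
--     return list(rev)==list(s)
--
-- def longest_nonpal(s:str)->int:
--     res = []
--     for i in range(len(s)):
--         for j in range(1,len(s)+1-i):
--             if(not is_palindrome(s[i:j])):
--                 res.append(len(s[i:j]))
--
--     if(len(res)==0):
--         return 0
--     return max(res)
-- ===== SOURCE B (Python) =====
-- def longest_nonpal(s: str) -> int:
--     # Closed form: every substring of a one-symbol string is a palindrome (-> 0);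
--     # otherwise the whole string (if non-palindromic) or the whole string minus
--     # its last character is the longest non-palindromic substring.
--     n = len(s)
--     if len(set(s)) <= 1:
--         return 0
--     return n if s != s[::-1] else n - 1
-- ===== Notes on version B (the rewrite author's own statement) =====
-- stated objective: faster
-- what changed: Replaced the O(n^3) enumerate-all-substrings-and-test loop by an O(n) closed form: 0 if all characters are equal, n if the string is not a palindrome, else n-1.
import Mathlib
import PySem

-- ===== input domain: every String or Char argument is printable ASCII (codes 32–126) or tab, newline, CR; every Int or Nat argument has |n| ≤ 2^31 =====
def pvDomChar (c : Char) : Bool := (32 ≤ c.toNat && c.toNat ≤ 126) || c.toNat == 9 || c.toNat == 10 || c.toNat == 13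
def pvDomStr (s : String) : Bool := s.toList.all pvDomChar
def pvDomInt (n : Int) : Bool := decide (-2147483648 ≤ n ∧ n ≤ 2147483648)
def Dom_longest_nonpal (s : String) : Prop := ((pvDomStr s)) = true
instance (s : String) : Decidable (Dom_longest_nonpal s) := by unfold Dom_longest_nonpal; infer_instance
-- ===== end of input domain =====

-- B replaces A's cubic enumerate-every-substring loop by a closed form (0 / n / n-1); equivalence proved for all strings.

-- ===== PORT A =====
def is_palindrome_port (t : List Char) : Bool := t.reverse == t

def longest_nonpal (s : String) : Int :=
  let l := s.toList
  let n : Int := PySem.List.len l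
  let res : List Int :=
    (PySem.List.pyRange 0 n 1).foldl (fun res i =>
      (PySem.List.pyRange 1 (n + 1 - i) 1).foldl (fun res j =>
        if !(is_palindrome_port (PySem.List.slice l (some i) (some j))) then
          res ++ [PySem.List.len (PySem.List.slice l (some i) (some j))]
        else res) res) []
  if res.length = 0 then 0 else (PySem.List.max? res (fun x => x)).getD 0

-- ===== PORT B =====
def longest_nonpal_alt (s : String) : Int :=
  let l := s.toList
  let n : Int := PySem.List.len l
  if PySem.List.len (PySem.Set.ofList l) ≤ 1 then 0
  else if l ≠ l.reverse then n else n - 1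

-- ===== PRECONDITION & SPEC =====
def Spec_longest_nonpal (s : String) (out : Int) : Prop := out = longest_nonpal_alt s
instance (s : String) (out : Int) : Decidable (Spec_longest_nonpal s out) := by unfold Spec_longest_nonpal; infer_instance

-- ===== CLAIM (what is proved, stated in full; the proofs are below) =====
def Claim_equal_longest_nonpal : Prop := ∀ (s : String), Dom_longest_nonpal s → Spec_longest_nonpal s (longest_nonpal s)

-- ===== LEMMAS AND PROOFS =====

-- the flattened form of A's collected list of substring lengths
def resList (l : List Char) : List Int :=
  (PySem.List.pyRange 0 (PySem.List.len l) 1).flatMap (fun i =>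
    ((PySem.List.pyRange 1 (PySem.List.len l + 1 - i) 1).filter
        (fun j => !(is_palindrome_port (PySem.List.slice l (some i) (some j))))).map
      (fun j => PySem.List.len (PySem.List.slice l (some i) (some j))))

lemma res_eq (l : List Char) :
    (PySem.List.pyRange 0 (PySem.List.len l) 1).foldl (fun res i =>
      (PySem.List.pyRange 1 (PySem.List.len l + 1 - i) 1).foldl (fun res j =>
        if !(is_palindrome_port (PySem.List.slice l (some i) (some j))) then
          res ++ [PySem.List.len (PySem.List.slice l (some i) (some j))]
        else res) res) [] = resList l := by
  simp only [PySem.List.foldl_append_if, PySem.List.foldl_append_eq_flatMap, resList]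
  simp

lemma mem_resList (l : List Char) (x : Int) :
    x ∈ resList l ↔ ∃ i j : Int, 0 ≤ i ∧ i < PySem.List.len l ∧ 1 ≤ j ∧ j < PySem.List.len l + 1 - i ∧
      ¬ ((PySem.List.slice l (some i) (some j)).reverse = PySem.List.slice l (some i) (some j)) ∧
      x = PySem.List.len (PySem.List.slice l (some i) (some j)) := by
  simp only [resList, List.mem_flatMap, List.mem_map, List.mem_filter, PySem.List.mem_pyRange_one,
    is_palindrome_port, Bool.not_eq_eq_eq_not, Bool.not_true, beq_eq_false_iff_ne, ne_eq]
  constructor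
  · rintro ⟨i, ⟨hi0, hin⟩, j, ⟨⟨hj1, hjn⟩, hnp⟩, hx⟩
    exact ⟨i, j, hi0, hin, hj1, hjn, hnp, hx.symm⟩
  · rintro ⟨i, j, hi0, hin, hj1, hjn, hnp, hx⟩
    exact ⟨i, ⟨hi0, hin⟩, j, ⟨⟨hj1, hjn⟩, hnp⟩, hx.symm⟩

lemma pal_of_const (t : List Char) (c : Char) (h : ∀ x ∈ t, x = c) : t.reverse = t := by
  have := List.eq_replicate_of_mem h
  rw [this, List.reverse_replicate]

lemma max_getD_eq {res : List Int} {m : Int} (hm : m ∈ res) (hb : ∀ x ∈ res, x ≤ m) :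
    (PySem.List.max? res (fun y => y)).getD 0 = m := by
  cases res with
  | nil => cases hm
  | cons r rs =>
    rw [PySem.List.max?_id_cons]
    simp only [Option.getD_some]
    have h1 := PySem.List.le_foldl_max rs r
    have h2 := PySem.List.foldl_max_mem rs r
    apply le_antisymm
    · rcases h2 with h | h
      · rw [h]; exact hb r (by simp)
      · exact hb _ (by simp [h])
    · rcases List.mem_cons.mp hm with h | h
      · subst h; exact h1.1
      · exact h1.2 m h

lemma pal_getElem {t : List Char} (h : t.reverse = t) (k : Nat) (hk : k < t.length) :
    t[k] = t[t.length - 1 - k]'(by omega) := by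
  have : t.reverse[k]'(by simpa using hk) = t[t.length - 1 - k]'(by omega) := by
    rw [List.getElem_reverse]
  rw [← this]
  exact (List.getElem_of_eq h (by simpa using hk)).symm

lemma adj_eq_of_two_pal (l : List Char) (h1 : l.reverse = l)
    (h2 : l.dropLast.reverse = l.dropLast) :
    ∀ i (_ : i + 1 < l.length), l[i] = l[i + 1] := by
  intro i hi
  have hlen : l.dropLast.length = l.length - 1 := @List.length_dropLast _ l
  have e1 : l[i] = l.dropLast[i]'(by omega) := (List.getElem_dropLast ..).symm
  have e2 := pal_getElem h2 i (by omega)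
  have e3 : l.dropLast[l.dropLast.length - 1 - i]'(by omega) = l[l.length - 2 - i]'(by omega) := by
    rw [List.getElem_dropLast]
    congr 1
    omega
  have e4 := pal_getElem h1 (l.length - 2 - i) (by omega)
  have e5 : l[l.length - 1 - (l.length - 2 - i)]'(by omega) = l[i + 1] := by
    congr 1
    omega
  rw [e1, e2, e3, e4, e5]

lemma getElem_eq_zero_of_adj (l : List Char) (hadj : ∀ i (_ : i + 1 < l.length), l[i] = l[i + 1]) :
    ∀ j (hj : j < l.length), l[j] = l[0]'(by omega) := by
  intro j
  induction j with
  | zero => intro _; rfl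
  | succ k ih => intro hj; rw [← hadj k (by omega)]; exact ih (by omega)

lemma all_eq_of_two_pal (l : List Char) (h1 : l.reverse = l)
    (h2 : l.dropLast.reverse = l.dropLast) {a b : Char} (ha : a ∈ l) (hb : b ∈ l) : a = b := by
  have hadj := adj_eq_of_two_pal l h1 h2
  obtain ⟨ia, hia, rfl⟩ := List.mem_iff_getElem.mp ha
  obtain ⟨ib, hib, rfl⟩ := List.mem_iff_getElem.mp hb
  rw [getElem_eq_zero_of_adj l hadj ia hia, getElem_eq_zero_of_adj l hadj ib hib]

lemma all_eq_of_card (l : List Char) (h : (PySem.Set.ofList l).length ≤ 1) :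
    ∀ a ∈ l, ∀ b ∈ l, a = b := by
  intro a ha b hb
  have ha' : a ∈ PySem.Set.ofList l := (PySem.Set.mem_ofList l a).mpr ha
  have hb' : b ∈ PySem.Set.ofList l := (PySem.Set.mem_ofList l b).mpr hb
  cases hl : PySem.Set.ofList l with
  | nil => rw [hl] at ha'; cases ha'
  | cons x t =>
    rw [hl] at ha' hb' h
    have ht : t = [] := List.eq_nil_of_length_eq_zero (by simp at h ⊢; omega)
    subst ht
    simp at ha' hb'
    rw [ha', hb']

lemma exists_ne_of_card (l : List Char) (h : ¬ (PySem.Set.ofList l).length ≤ 1) :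
    ∃ a ∈ l, ∃ b ∈ l, a ≠ b := by
  have hnd := PySem.Set.nodup_ofList l
  cases hl : PySem.Set.ofList l with
  | nil => rw [hl] at h; simp at h
  | cons x t =>
    cases t with
    | nil => rw [hl] at h; simp at h
    | cons y t2 =>
      rw [hl] at hnd
      have hxy : x ≠ y := by
        have := List.nodup_cons.mp hnd
        intro he; exact this.1 (he ▸ List.mem_cons_self ..)
      refine ⟨x, ?_, y, ?_, hxy⟩
      · exact (PySem.Set.mem_ofList l x).mp (hl ▸ List.mem_cons_self ..)
      · exact (PySem.Set.mem_ofList l y).mp (hl ▸ (by simp))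

lemma slice_full (l : List Char) : PySem.List.slice l (some 0) (some (l.length : Int)) = l := by
  rw [PySem.List.slice_toNat l (by omega) (by omega)]
  simp

lemma slice_front (l : List Char) (h : 1 ≤ l.length) :
    PySem.List.slice l (some 0) (some ((l.length : Int) - 1)) = l.dropLast := by
  rw [PySem.List.slice_toNat l (by omega) (by omega)]
  have h1 : ((l.length : Int) - 1).toNat = l.length - 1 := by omega
  have h2 : (0 : Int).toNat = 0 := rfl
  rw [h1, h2]
  simp [List.dropLast_eq_take]

lemma resList_bound (l : List Char) {x : Int} (hx : x ∈ resList l) :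
    x ≤ (l.length : Int) ∧ (l.reverse = l → x ≤ (l.length : Int) - 1) := by
  obtain ⟨i, j, hi0, hin, hj1, hjn, hnp, hxe⟩ := (mem_resList l x).mp hx
  simp only [PySem.List.len_eq] at hin hjn hxe
  rw [PySem.List.slice_toNat l hi0 (by omega)] at hnp hxe
  rw [List.length_take, List.length_drop] at hxe
  constructor
  · omega
  · intro hp
    by_contra hgt
    have hi00 : i = 0 := by omega
    have hjge : l.length ≤ j.toNat := by omega
    have hsl : (l.drop i.toNat).take (j.toNat - i.toNat) = l := by
      subst hi00
      simp only [Int.toNat_zero, List.drop_zero, Nat.sub_zero]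
      exact List.take_of_length_le (by omega)
    rw [hsl] at hnp
    exact hnp hp

lemma mem_full (l : List Char) (h2 : 2 ≤ l.length) (hnp : ¬ l.reverse = l) :
    (l.length : Int) ∈ resList l := by
  rw [mem_resList]
  simp only [PySem.List.len_eq]
  refine ⟨0, (l.length : Int), by omega, by omega, by omega, by omega, ?_, ?_⟩
  · rw [slice_full]; exact hnp
  · rw [slice_full]

lemma mem_front (l : List Char) (h2 : 2 ≤ l.length) (hnp : ¬ l.dropLast.reverse = l.dropLast) :
    (l.length : Int) - 1 ∈ resList l := by
  rw [mem_resList]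
  simp only [PySem.List.len_eq]
  refine ⟨0, (l.length : Int) - 1, by omega, by omega, by omega, by omega, ?_, ?_⟩
  · rw [slice_front l (by omega)]; exact hnp
  · rw [slice_front l (by omega)]
    rw [@List.length_dropLast _ l]
    omega

lemma resList_nil_of_const (l : List Char) (hc : ∀ a ∈ l, ∀ b ∈ l, a = b) : resList l = [] := by
  rw [List.eq_nil_iff_forall_not_mem]
  intro x hx
  obtain ⟨i, j, _, _, _, _, hnp, _⟩ := (mem_resList l x).mp hx
  apply hnp
  have hsub : ∀ y ∈ PySem.List.slice l (some i) (some j), y ∈ l := by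
    intro y hy
    exact PySem.List.mem_of_mem_slice l (some i) (some j) hy
  cases hs : PySem.List.slice l (some i) (some j) with
  | nil => rfl
  | cons c t =>
    rw [hs] at hsub
    exact pal_of_const (c :: t) c
      (fun y hy => hc y (hsub y hy) c (hsub c (List.mem_cons_self ..)))

lemma main_list (l : List Char) :
    (if (resList l).length = 0 then (0 : Int) else (PySem.List.max? (resList l) (fun x => x)).getD 0)
      = (if PySem.List.len (PySem.Set.ofList l) ≤ 1 then 0
         else if l ≠ l.reverse then PySem.List.len l else PySem.List.len l - 1) := by
  simp only [PySem.List.len_eq]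
  by_cases hset : ((PySem.Set.ofList l).length : Int) ≤ 1
  · rw [if_pos hset, resList_nil_of_const l (all_eq_of_card l (by exact_mod_cast hset))]
    simp
  · rw [if_neg hset]
    obtain ⟨a, ha, b, hb, hab⟩ := exists_ne_of_card l (fun h => hset (by exact_mod_cast h))
    have h2 : 2 ≤ l.length := by
      rcases l with _ | ⟨c, _ | ⟨d, t⟩⟩
      · cases ha
      · simp at ha hb; exact absurd (ha.trans hb.symm) hab
      · simp
    by_cases hp : l = l.reverse
    · rw [if_neg (not_not_intro hp)]
      have hp' : l.reverse = l := hp.symm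
      have hnp2 : ¬ l.dropLast.reverse = l.dropLast :=
        fun h => hab (all_eq_of_two_pal l hp' h ha hb)
      have hm := mem_front l h2 hnp2
      have hne : ¬ (resList l).length = 0 := by
        intro h; rw [List.length_eq_zero_iff] at h; rw [h] at hm; cases hm
      rw [if_neg hne]
      exact max_getD_eq hm (fun x hx => (resList_bound l hx).2 hp')
    · rw [if_pos hp]
      have hm := mem_full l h2 (fun h => hp h.symm)
      have hne : ¬ (resList l).length = 0 := by
        intro h; rw [List.length_eq_zero_iff] at h; rw [h] at hm; cases hm
      rw [if_neg hne]
      exact max_getD_eq hm (fun x hx => (resList_bound l hx).1)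

lemma main_lemma (s : String) : longest_nonpal s = longest_nonpal_alt s := by
  unfold longest_nonpal longest_nonpal_alt
  simp only [res_eq]
  exact main_list s.toList

-- ===== VERDICT (by name: the statement is the Claim_ definition above) =====
theorem longest_nonpal_spec : Claim_equal_longest_nonpal := by
  intro s _
  unfold Spec_longest_nonpal
  exact main_lemma s
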